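-- pv_equiv track=rewrite | github.com/DigitalWestern/tos-resources | scripts/pubmed_fetch.py | classify_article_type
-- ===== SOURCE A (Python) =====
-- def classify_article_type(pub_types):
--     """Map PubMed publication types to a single display label."""
--     types_lower = [t.lower() for t in pub_types]
--     # Check in priority order (most specific first)
--     if "meta-analysis" in types_lower:
--         return "Meta-Analysis"
--     if "systematic review" in types_lower:
--         return "Systematic Review"
--     if "review" in types_lower:
--         return "Review"
--     if "case reports" in types_lower:
--         return "Case Report"
--     if "clinical trial" in types_lower or "randomized controlled trial" in types_lower:
--         return "Clinical Trial"
--     if "editorial" in types_lower: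
--         return "Editorial"
--     if "letter" in types_lower or "comment" in types_lower:
--         return "Letter"
--     if "comparative study" in types_lower:
--         return "Comparative Study"
--     # Default: if it has "journal article", call it Research
--     if "journal article" in types_lower:
--         return "Research"
--     return "Other"
-- ===== SOURCE B (Python) =====
-- _PRIORITY = {
--     "meta-analysis": (0, "Meta-Analysis"),
--     "systematic review": (1, "Systematic Review"),
--     "review": (2, "Review"),
--     "case reports": (3, "Case Report"),
--     "clinical trial": (4, "Clinical Trial"),
--     "randomized controlled trial": (4, "Clinical Trial"),
--     "editorial": (5, "Editorial"),
--     "letter": (6, "Letter"),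
--     "comment": (6, "Letter"),
--     "comparative study": (7, "Comparative Study"),
--     "journal article": (8, "Research"),
-- }
--
-- def classify_article_type(pub_types):
--     """Map PubMed publication types to a single display label."""
--     # One pass over the input: keep the best (lowest) priority rank seen so far.
--     best_rank, best_label = 9, "Other"
--     for t in pub_types:
--         hit = _PRIORITY.get(t.lower())
--         if hit is not None and hit[0] < best_rank:
--             best_rank, best_label = hit
--     return best_label
-- ===== Notes on version B (the rewrite author's own statement) =====
-- stated objective: faster
-- what changed: Instead of A's nine-branch membership cascade (up to 11 scans of the lowercased list), B makes a single pass over the input, looking each lowered type up in a rank/label priority dict and keeping the lowest rank seen, then returns that rank's label.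
import Mathlib
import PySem

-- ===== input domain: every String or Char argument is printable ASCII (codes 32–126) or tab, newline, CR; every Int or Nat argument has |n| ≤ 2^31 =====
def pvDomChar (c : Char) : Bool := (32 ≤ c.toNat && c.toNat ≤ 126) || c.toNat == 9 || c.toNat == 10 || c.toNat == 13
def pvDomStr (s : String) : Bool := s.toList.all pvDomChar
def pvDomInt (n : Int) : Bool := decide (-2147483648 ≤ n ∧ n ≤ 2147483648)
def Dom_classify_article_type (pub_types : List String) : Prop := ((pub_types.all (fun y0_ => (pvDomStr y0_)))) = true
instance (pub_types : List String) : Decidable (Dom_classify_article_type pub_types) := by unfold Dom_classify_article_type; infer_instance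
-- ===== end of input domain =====

-- B replaces A's nine-branch membership cascade by a single pass over the input that keeps the
-- lowest-ranked hit from a rank/label priority table (alternative decomposition, same result).

-- ===== PORT A =====
def classify_article_type (pub_types : List String) : String :=
  let types_lower := pub_types.map (fun t => PySem.Str.lower t)
  if types_lower.contains "meta-analysis" then "Meta-Analysis"
  else if types_lower.contains "systematic review" then "Systematic Review"
  else if types_lower.contains "review" then "Review"
  else if types_lower.contains "case reports" then "Case Report"
  else if types_lower.contains "clinical trial" || types_lower.contains "randomized controlled trial" then "Clinical Trial"
  else if types_lower.contains "editorial" then "Editorial"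
  else if types_lower.contains "letter" || types_lower.contains "comment" then "Letter"
  else if types_lower.contains "comparative study" then "Comparative Study"
  else if types_lower.contains "journal article" then "Research"
  else "Other"

-- ===== PORT B =====
-- the module-level dict literal _PRIORITY (insertion order, all keys distinct)
def pvPriority : PySem.Dict String (Int × String) :=
  PySem.Dict.mk
    [("meta-analysis", (0, "Meta-Analysis")),
     ("systematic review", (1, "Systematic Review")),
     ("review", (2, "Review")),
     ("case reports", (3, "Case Report")),
     ("clinical trial", (4, "Clinical Trial")),
     ("randomized controlled trial", (4, "Clinical Trial")),
     ("editorial", (5, "Editorial")),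
     ("letter", (6, "Letter")),
     ("comment", (6, "Letter")),
     ("comparative study", (7, "Comparative Study")),
     ("journal article", (8, "Research"))]

-- the loop: hit = _PRIORITY.get(t.lower()); if hit is not None and hit[0] < best_rank: best = hit
def pvLoop : List String → Int × String → Int × String
  | [], best => best
  | t :: rest, best =>
      match PySem.Dict.get? pvPriority (PySem.Str.lower t) with
      | some hit => pvLoop rest (if hit.1 < best.1 then hit else best)
      | none => pvLoop rest best

def classify_article_type_alt (pub_types : List String) : String :=
  (pvLoop pub_types (9, "Other")).2

-- ===== PRECONDITION & SPEC =====
def Spec_classify_article_type (pub_types : List String) (out : String) : Prop := out = classify_article_type_alt pub_types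
instance (pub_types : List String) (out : String) : Decidable (Spec_classify_article_type pub_types out) := by unfold Spec_classify_article_type; infer_instance

-- ===== CLAIM (what is proved, stated in full; the proofs are below) =====
def Claim_equal_classify_article_type : Prop := ∀ (pub_types : List String), Dom_classify_article_type pub_types → Spec_classify_article_type pub_types (classify_article_type pub_types)

-- ===== LEMMAS AND PROOFS =====

-- priority rank of a (lowercased) type string: the rank stored in _PRIORITY, 9 if absent
def pvRk (s : String) : Int :=
  if "meta-analysis" = s then 0 else if "systematic review" = s then 1
  else if "review" = s then 2 else if "case reports" = s then 3
  else if "clinical trial" = s then 4 else if "randomized controlled trial" = s then 4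
  else if "editorial" = s then 5 else if "letter" = s then 6 else if "comment" = s then 6
  else if "comparative study" = s then 7 else if "journal article" = s then 8 else 9

-- display label of a rank
def pvLab (r : Int) : String :=
  if r = 0 then "Meta-Analysis" else if r = 1 then "Systematic Review"
  else if r = 2 then "Review" else if r = 3 then "Case Report"
  else if r = 4 then "Clinical Trial" else if r = 5 then "Editorial"
  else if r = 6 then "Letter" else if r = 7 then "Comparative Study"
  else if r = 8 then "Research" else "Other"

-- minimal rank occurring in the list (9 if none)
def pvM (ls : List String) : Int := ls.foldr (fun t m => min (pvRk (PySem.Str.lower t)) m) 9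

-- _PRIORITY.get, described through pvRk/pvLab
set_option maxHeartbeats 1000000 in
lemma pvHit (s : String) :
    PySem.Dict.get? pvPriority s = if pvRk s < 9 then some (pvRk s, pvLab (pvRk s)) else none := by
  unfold pvPriority pvRk
  simp only [PySem.Dict.get?_mk_cons, beq_iff_eq]
  by_cases h0 : "meta-analysis" = s
  · subst h0; decide
  simp only [if_neg h0]
  by_cases h1 : "systematic review" = s
  · subst h1; decide
  simp only [if_neg h1]
  by_cases h2 : "review" = s
  · subst h2; decide
  simp only [if_neg h2]
  by_cases h3 : "case reports" = s
  · subst h3; decide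
  simp only [if_neg h3]
  by_cases h4 : "clinical trial" = s
  · subst h4; decide
  simp only [if_neg h4]
  by_cases h5 : "randomized controlled trial" = s
  · subst h5; decide
  simp only [if_neg h5]
  by_cases h6 : "editorial" = s
  · subst h6; decide
  simp only [if_neg h6]
  by_cases h7 : "letter" = s
  · subst h7; decide
  simp only [if_neg h7]
  by_cases h8 : "comment" = s
  · subst h8; decide
  simp only [if_neg h8]
  by_cases h9 : "comparative study" = s
  · subst h9; decide
  simp only [if_neg h9]
  by_cases h10 : "journal article" = s
  · subst h10; decide
  simp only [if_neg h10]
  norm_num [PySem.Dict.get?]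

lemma pvM_le (ls : List String) : pvM ls ≤ 9 := by
  induction ls with
  | nil => simp [pvM]
  | cons t ls ih => simp only [pvM, List.foldr] at *; omega

-- loop invariant: pvLoop keeps the minimum rank seen (and its label) against the running best
lemma pvLoop_eq (ls : List String) : ∀ br bl, br ≤ 9 →
    pvLoop ls (br, bl) = if pvM ls < br then (pvM ls, pvLab (pvM ls)) else (br, bl) := by
  induction ls with
  | nil => intro br bl hbr; simp only [pvLoop, pvM, List.foldr]; rw [if_neg (by omega)]
  | cons t ls ih =>
    intro br bl hbr
    have hM : pvM (t :: ls) = min (pvRk (PySem.Str.lower t)) (pvM ls) := rfl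
    have hMle := pvM_le ls
    simp only [pvLoop, pvHit]
    by_cases hr : pvRk (PySem.Str.lower t) < 9
    · rw [if_pos hr]
      dsimp only
      by_cases h2 : pvRk (PySem.Str.lower t) < br
      · rw [if_pos h2, ih _ _ (by omega), hM]
        by_cases h3 : pvM ls < pvRk (PySem.Str.lower t)
        · rw [min_eq_right (le_of_lt h3), if_pos h3, if_pos (by omega)]
        · rw [min_eq_left (by omega), if_neg h3, if_pos h2]
      · rw [if_neg h2, ih _ _ hbr, hM]
        by_cases h3 : pvM ls < br
        · rw [if_pos h3, if_pos (by omega), min_eq_right (by omega)]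
        · rw [if_neg h3, if_neg (by rw [min_def]; split_ifs <;> omega)]
    · rw [if_neg hr]
      dsimp only
      rw [ih _ _ hbr, hM, min_eq_right (by omega)]

lemma B_lab (ls : List String) : classify_article_type_alt ls = pvLab (pvM ls) := by
  unfold classify_article_type_alt
  rw [pvLoop_eq ls 9 "Other" (by omega)]
  have := pvM_le ls
  by_cases h : pvM ls < 9
  · rw [if_pos h]
  · rw [if_neg h]
    have h9 : pvM ls = 9 := by omega
    rw [h9]; rfl

-- Bool membership of key k among the lowercased types, and A's cascade in rank form
def pvC (ls : List String) (k : String) : Bool := (ls.map (fun t => PySem.Str.lower t)).contains k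

def pvAR (ls : List String) : Int :=
  if pvC ls "meta-analysis" then 0 else if pvC ls "systematic review" then 1
  else if pvC ls "review" then 2 else if pvC ls "case reports" then 3
  else if pvC ls "clinical trial" || pvC ls "randomized controlled trial" then 4
  else if pvC ls "editorial" then 5 else if pvC ls "letter" || pvC ls "comment" then 6
  else if pvC ls "comparative study" then 7 else if pvC ls "journal article" then 8 else 9

lemma A_lab (ls : List String) : classify_article_type ls = pvLab (pvAR ls) := by
  show (if pvC ls "meta-analysis" then "Meta-Analysis"
    else if pvC ls "systematic review" then "Systematic Review"
    else if pvC ls "review" then "Review"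
    else if pvC ls "case reports" then "Case Report"
    else if (pvC ls "clinical trial" || pvC ls "randomized controlled trial") then "Clinical Trial"
    else if pvC ls "editorial" then "Editorial"
    else if (pvC ls "letter" || pvC ls "comment") then "Letter"
    else if pvC ls "comparative study" then "Comparative Study"
    else if pvC ls "journal article" then "Research"
    else "Other") = pvLab (pvAR ls)
  unfold pvAR
  by_cases h0 : pvC ls "meta-analysis" = true
  · rw [if_pos h0, if_pos h0]; norm_num [pvLab]
  rw [if_neg h0, if_neg h0]
  by_cases h1 : pvC ls "systematic review" = true
  · rw [if_pos h1, if_pos h1]; norm_num [pvLab]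
  rw [if_neg h1, if_neg h1]
  by_cases h2 : pvC ls "review" = true
  · rw [if_pos h2, if_pos h2]; norm_num [pvLab]
  rw [if_neg h2, if_neg h2]
  by_cases h3 : pvC ls "case reports" = true
  · rw [if_pos h3, if_pos h3]; norm_num [pvLab]
  rw [if_neg h3, if_neg h3]
  by_cases h4 : (pvC ls "clinical trial" || pvC ls "randomized controlled trial") = true
  · rw [if_pos h4, if_pos h4]; norm_num [pvLab]
  rw [if_neg h4, if_neg h4]
  by_cases h5 : pvC ls "editorial" = true
  · rw [if_pos h5, if_pos h5]; norm_num [pvLab]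
  rw [if_neg h5, if_neg h5]
  by_cases h6 : (pvC ls "letter" || pvC ls "comment") = true
  · rw [if_pos h6, if_pos h6]; norm_num [pvLab]
  rw [if_neg h6, if_neg h6]
  by_cases h7 : pvC ls "comparative study" = true
  · rw [if_pos h7, if_pos h7]; norm_num [pvLab]
  rw [if_neg h7, if_neg h7]
  by_cases h8 : pvC ls "journal article" = true
  · rw [if_pos h8, if_pos h8]; norm_num [pvLab]
  rw [if_neg h8, if_neg h8]
  norm_num [pvLab]

lemma pvC_iff (ls : List String) (k : String) : pvC ls k = true ↔ ∃ t ∈ ls, PySem.Str.lower t = k := by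
  simp [pvC]

lemma rk_bounds (s : String) : 0 ≤ pvRk s ∧ pvRk s ≤ 9 := by
  unfold pvRk; split_ifs <;> omega

-- which strings carry each rank (all nine at once: one case split over pvRk)
set_option maxHeartbeats 1000000 in
lemma rk_facts (s : String) :
    (pvRk s = 0 ↔ "meta-analysis" = s) ∧ (pvRk s = 1 ↔ "systematic review" = s) ∧
    (pvRk s = 2 ↔ "review" = s) ∧ (pvRk s = 3 ↔ "case reports" = s) ∧
    (pvRk s = 4 ↔ ("clinical trial" = s ∨ "randomized controlled trial" = s)) ∧
    (pvRk s = 5 ↔ "editorial" = s) ∧ (pvRk s = 6 ↔ ("letter" = s ∨ "comment" = s)) ∧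
    (pvRk s = 7 ↔ "comparative study" = s) ∧ (pvRk s = 8 ↔ "journal article" = s) := by
  unfold pvRk
  split_ifs with h0 h1 h2 h3 h4 h5 h6 h7 h8 h9 h10
  case pos => subst h0; simp
  case pos => subst h1; simp
  case pos => subst h2; simp
  case pos => subst h3; simp
  case pos => subst h4; simp
  case pos => subst h5; simp
  case pos => subst h6; simp
  case pos => subst h7; simp
  case pos => subst h8; simp
  case pos => subst h9; simp
  case pos => subst h10; simp
  case neg =>
    refine ⟨iff_of_false (by omega) h0, iff_of_false (by omega) h1, iff_of_false (by omega) h2,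
      iff_of_false (by omega) h3, iff_of_false (by omega) ?_, iff_of_false (by omega) h6,
      iff_of_false (by omega) ?_, iff_of_false (by omega) h9, iff_of_false (by omega) h10⟩
    · rintro (h | h); exact h4 h; exact h5 h
    · rintro (h | h); exact h7 h; exact h8 h

lemma pvM_le_of_mem (ls : List String) (t : String) (ht : t ∈ ls) : pvM ls ≤ pvRk (PySem.Str.lower t) := by
  induction ls with
  | nil => cases ht
  | cons u ls ih =>
    have hM : pvM (u :: ls) = min (pvRk (PySem.Str.lower u)) (pvM ls) := rfl
    rcases List.mem_cons.mp ht with h | h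
    · subst h; rw [hM]; omega
    · have := ih h; rw [hM]; omega

lemma pvM_mem (ls : List String) : pvM ls = 9 ∨ ∃ t ∈ ls, pvRk (PySem.Str.lower t) = pvM ls := by
  induction ls with
  | nil => left; rfl
  | cons u ls ih =>
    have hM : pvM (u :: ls) = min (pvRk (PySem.Str.lower u)) (pvM ls) := rfl
    have h9 := pvM_le ls
    have hu9 := (rk_bounds (PySem.Str.lower u)).2
    rcases ih with h | ⟨t, ht, hrt⟩
    · by_cases hc : pvRk (PySem.Str.lower u) = 9
      · left; rw [hM]; omega
      · right; exact ⟨u, List.mem_cons_self, by rw [hM]; omega⟩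
    · right
      by_cases hc : pvRk (PySem.Str.lower u) ≤ pvM ls
      · exact ⟨u, List.mem_cons_self, by rw [hM]; omega⟩
      · exact ⟨t, List.mem_cons_of_mem _ ht, by rw [hM]; omega⟩

-- A's cascade conditions, restated as 'some input type has rank r'
lemma c0 (ls : List String) : (pvC ls "meta-analysis" = true) = (∃ t ∈ ls, pvRk (PySem.Str.lower t) = 0) := by
  simp only [pvC_iff]; apply propext; constructor <;> rintro ⟨t, ht, h⟩
  · exact ⟨t, ht, ((rk_facts _).1).mpr h.symm⟩
  · exact ⟨t, ht, (((rk_facts _).1).mp h).symm⟩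
lemma c1 (ls : List String) : (pvC ls "systematic review" = true) = (∃ t ∈ ls, pvRk (PySem.Str.lower t) = 1) := by
  simp only [pvC_iff]; apply propext; constructor <;> rintro ⟨t, ht, h⟩
  · exact ⟨t, ht, ((rk_facts _).2.1).mpr h.symm⟩
  · exact ⟨t, ht, (((rk_facts _).2.1).mp h).symm⟩
lemma c2 (ls : List String) : (pvC ls "review" = true) = (∃ t ∈ ls, pvRk (PySem.Str.lower t) = 2) := by
  simp only [pvC_iff]; apply propext; constructor <;> rintro ⟨t, ht, h⟩
  · exact ⟨t, ht, ((rk_facts _).2.2.1).mpr h.symm⟩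
  · exact ⟨t, ht, (((rk_facts _).2.2.1).mp h).symm⟩
lemma c3 (ls : List String) : (pvC ls "case reports" = true) = (∃ t ∈ ls, pvRk (PySem.Str.lower t) = 3) := by
  simp only [pvC_iff]; apply propext; constructor <;> rintro ⟨t, ht, h⟩
  · exact ⟨t, ht, ((rk_facts _).2.2.2.1).mpr h.symm⟩
  · exact ⟨t, ht, (((rk_facts _).2.2.2.1).mp h).symm⟩
lemma c5 (ls : List String) : (pvC ls "editorial" = true) = (∃ t ∈ ls, pvRk (PySem.Str.lower t) = 5) := by
  simp only [pvC_iff]; apply propext; constructor <;> rintro ⟨t, ht, h⟩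
  · exact ⟨t, ht, ((rk_facts _).2.2.2.2.2.1).mpr h.symm⟩
  · exact ⟨t, ht, (((rk_facts _).2.2.2.2.2.1).mp h).symm⟩
lemma c7 (ls : List String) : (pvC ls "comparative study" = true) = (∃ t ∈ ls, pvRk (PySem.Str.lower t) = 7) := by
  simp only [pvC_iff]; apply propext; constructor <;> rintro ⟨t, ht, h⟩
  · exact ⟨t, ht, ((rk_facts _).2.2.2.2.2.2.2.1).mpr h.symm⟩
  · exact ⟨t, ht, (((rk_facts _).2.2.2.2.2.2.2.1).mp h).symm⟩
lemma c8 (ls : List String) : (pvC ls "journal article" = true) = (∃ t ∈ ls, pvRk (PySem.Str.lower t) = 8) := by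
  simp only [pvC_iff]; apply propext; constructor <;> rintro ⟨t, ht, h⟩
  · exact ⟨t, ht, ((rk_facts _).2.2.2.2.2.2.2.2).mpr h.symm⟩
  · exact ⟨t, ht, (((rk_facts _).2.2.2.2.2.2.2.2).mp h).symm⟩
lemma c4 (ls : List String) : ((pvC ls "clinical trial" || pvC ls "randomized controlled trial") = true) = (∃ t ∈ ls, pvRk (PySem.Str.lower t) = 4) := by
  simp only [Bool.or_eq_true, pvC_iff]; apply propext; constructor
  · rintro (⟨t, ht, h⟩ | ⟨t, ht, h⟩)
    · exact ⟨t, ht, ((rk_facts _).2.2.2.2.1).mpr (Or.inl h.symm)⟩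
    · exact ⟨t, ht, ((rk_facts _).2.2.2.2.1).mpr (Or.inr h.symm)⟩
  · rintro ⟨t, ht, h⟩
    rcases ((rk_facts _).2.2.2.2.1).mp h with h' | h'
    · exact Or.inl ⟨t, ht, h'.symm⟩
    · exact Or.inr ⟨t, ht, h'.symm⟩
lemma c6 (ls : List String) : ((pvC ls "letter" || pvC ls "comment") = true) = (∃ t ∈ ls, pvRk (PySem.Str.lower t) = 6) := by
  simp only [Bool.or_eq_true, pvC_iff]; apply propext; constructor
  · rintro (⟨t, ht, h⟩ | ⟨t, ht, h⟩)
    · exact ⟨t, ht, ((rk_facts _).2.2.2.2.2.2.1).mpr (Or.inl h.symm)⟩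
    · exact ⟨t, ht, ((rk_facts _).2.2.2.2.2.2.1).mpr (Or.inr h.symm)⟩
  · rintro ⟨t, ht, h⟩
    rcases ((rk_facts _).2.2.2.2.2.2.1).mp h with h' | h'
    · exact Or.inl ⟨t, ht, h'.symm⟩
    · exact Or.inr ⟨t, ht, h'.symm⟩

-- the minimal rank IS what A's cascade computes
lemma M_AR (ls : List String) : pvM ls = pvAR ls := by
  have hE : ∀ (r : Int), (∃ t ∈ ls, pvRk (PySem.Str.lower t) = r) → pvM ls ≤ r := by
    rintro r ⟨t, ht, h⟩; have := pvM_le_of_mem ls t ht; omega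
  have h9 := pvM_le ls
  unfold pvAR
  simp only [c0, c1, c2, c3, c4, c5, c6, c7, c8]
  by_cases hm : pvM ls = 9
  · rw [if_neg (fun h => by have := hE 0 h; omega), if_neg (fun h => by have := hE 1 h; omega),
        if_neg (fun h => by have := hE 2 h; omega), if_neg (fun h => by have := hE 3 h; omega),
        if_neg (fun h => by have := hE 4 h; omega), if_neg (fun h => by have := hE 5 h; omega),
        if_neg (fun h => by have := hE 6 h; omega), if_neg (fun h => by have := hE 7 h; omega),
        if_neg (fun h => by have := hE 8 h; omega)]
    exact hm
  · rcases pvM_mem ls with h | ⟨t, ht, hrt⟩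
    · exact absurd h hm
    · have h0 : 0 ≤ pvM ls := by have := (rk_bounds (PySem.Str.lower t)).1; omega
      set m := pvM ls with hmdef
      have hEm : ∃ u ∈ ls, pvRk (PySem.Str.lower u) = m := ⟨t, ht, hrt⟩
      have hm8 : m ≤ 8 := by omega
      split_ifs with g0 g1 g2 g3 g4 g5 g6 g7 g8 <;>
        [have hle := hE 0 g0; have hle := hE 1 g1; have hle := hE 2 g2; have hle := hE 3 g3;
         have hle := hE 4 g4; have hle := hE 5 g5; have hle := hE 6 g6; have hle := hE 7 g7;
         have hle := hE 8 g8; skip] <;>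
      interval_cases m <;>
        first
          | omega
          | exact absurd hEm g0 | exact absurd hEm g1 | exact absurd hEm g2 | exact absurd hEm g3
          | exact absurd hEm g4 | exact absurd hEm g5 | exact absurd hEm g6 | exact absurd hEm g7
          | exact absurd hEm g8

-- ===== VERDICT (by name: the statement is the Claim_ definition above) =====
theorem classify_article_type_spec : Claim_equal_classify_article_type := by
  intro pub_types _
  unfold Spec_classify_article_type
  rw [A_lab, B_lab, M_AR]
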